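-- pv_equiv track=rewrite | github.com/TforThomas/translator | backend/services/translator.py | pick_relevant_terms
-- ===== SOURCE A (Python) =====
-- def pick_relevant_terms(text: str, term_dict: dict[str, str]) -> dict[str, str]:
--     """只把出现在当前段里的术语注入 prompt，避免长 glossary 拖垮 latency / token。"""
--     if not term_dict:
--         return {}
--     lower_text = (text or "").lower()
--     picked: dict[str, str] = {}
--     for source, target in term_dict.items():
--         if not source or not target:
--             continue
--         if source.lower() in lower_text:
--             picked[source] = target
--     return picked
-- ===== SOURCE B (Python) =====
-- def pick_relevant_terms(text: str, term_dict: dict[str, str]) -> dict[str, str]: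
--     lower_text = (text or "").lower()
--     n = len(lower_text)
--     lengths = {len(s) for s, t in term_dict.items() if s and t}
--     found = set()
--     for L in lengths:
--         for i in range(n - L + 1):
--             found.add(lower_text[i:i + L])
--     return {s: t for s, t in term_dict.items() if s and t and s.lower() in found}
-- ===== Notes on version B (the rewrite author's own statement) =====
-- stated objective: faster
-- what changed: Instead of running a substring search of the text for every term, B builds once, per distinct (non-empty, non-dropped) term length L, the hash set of all length-L substrings of the lowered text, and selects terms by a single set-membership lookup each, keeping dict order.
import Mathlib
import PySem

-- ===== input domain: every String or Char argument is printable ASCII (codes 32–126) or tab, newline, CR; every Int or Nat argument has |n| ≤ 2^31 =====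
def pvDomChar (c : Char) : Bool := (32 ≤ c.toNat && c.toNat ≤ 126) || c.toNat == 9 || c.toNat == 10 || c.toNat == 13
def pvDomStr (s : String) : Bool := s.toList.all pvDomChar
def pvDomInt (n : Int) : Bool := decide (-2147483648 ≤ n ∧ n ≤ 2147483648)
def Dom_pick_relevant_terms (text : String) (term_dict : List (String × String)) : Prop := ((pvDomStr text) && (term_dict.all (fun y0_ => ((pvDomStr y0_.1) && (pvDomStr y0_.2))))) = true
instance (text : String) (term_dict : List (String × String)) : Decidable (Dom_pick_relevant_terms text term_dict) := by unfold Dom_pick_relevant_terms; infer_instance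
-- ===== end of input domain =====

-- B replaces A's per-term substring search of the text by a substring index: the set of all
-- lowered-text substrings of each needed pattern length, built once, then one hash lookup per term
-- (objective: faster — one text scan per distinct term length instead of one search per term).

-- ===== PORT A =====
-- Literal transliteration of A: early return on empty dict, lower the text once, then one
-- `source.lower() in lower_text` substring test per item, inserting hits into a fresh dict.
def pick_relevant_terms (text : String) (term_dict : List (String × String)) : List (String × String) :=
  if term_dict = [] then []
  else
    let lower_text := PySem.Str.lower (if text = "" then "" else text)
    (term_dict.foldl
      (fun (picked : PySem.Dict String String) st =>
        if st.1 = "" ∨ st.2 = "" then picked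
        else if PySem.Str.isIn (PySem.Str.lower st.1) lower_text then picked.insert st.1 st.2
        else picked)
      PySem.Dict.empty).items

-- ===== PORT B =====
-- {len(s) for s, t in term_dict.items() if s and t}
def pvLens (term_dict : List (String × String)) : PySem.Set Int :=
  PySem.Set.ofList
    ((term_dict.filter (fun st => !(st.1 == "") && !(st.2 == ""))).map (fun st => PySem.Str.len st.1))

-- found = set(); for L in lengths: for i in range(n - L + 1): found.add(lower_text[i:i+L])
def pvFound (lower_text : String) (lens : PySem.Set Int) : PySem.Set String :=
  List.foldl
    (fun fd L =>
      List.foldl (fun fd i => PySem.Set.add fd (PySem.Str.slice lower_text (some i) (some (i + L))))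
        fd (PySem.List.pyRange 0 (PySem.Str.len lower_text - L + 1)))
    PySem.Set.empty lens

def pick_relevant_terms_alt (text : String) (term_dict : List (String × String)) : List (String × String) :=
  let lower_text := PySem.Str.lower (if text = "" then "" else text)
  let found := pvFound lower_text (pvLens term_dict)
  -- {s: t for s, t in term_dict.items() if s and t and s.lower() in found}
  (term_dict.foldl
    (fun (d : PySem.Dict String String) st =>
      if !(st.1 == "") && !(st.2 == "") && PySem.Set.contains found (PySem.Str.lower st.1) then
        d.insert st.1 st.2
      else d)
    PySem.Dict.empty).items

-- ===== PRECONDITION & SPEC =====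
def Spec_pick_relevant_terms (text : String) (term_dict : List (String × String)) (out : List (String × String)) : Prop := out = pick_relevant_terms_alt text term_dict
instance (text : String) (term_dict : List (String × String)) (out : List (String × String)) : Decidable (Spec_pick_relevant_terms text term_dict out) := by unfold Spec_pick_relevant_terms; infer_instance

-- ===== CLAIM (what is proved, stated in full; the proofs are below) =====
def Claim_equal_pick_relevant_terms : Prop := ∀ (text : String) (term_dict : List (String × String)), Dom_pick_relevant_terms text term_dict → Spec_pick_relevant_terms text term_dict (pick_relevant_terms text term_dict)

-- ===== LEMMAS AND PROOFS =====

lemma pv_mem_foldl_add {α β : Type} [BEq α] [LawfulBEq α] (l : List β) (g : β → α)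
    (s0 : PySem.Set α) (y : α) :
    (y ∈ List.foldl (fun s b => PySem.Set.add s (g b)) s0 l) ↔ y ∈ s0 ∨ ∃ b ∈ l, g b = y := by
  induction l generalizing s0 with
  | nil => simp
  | cons b bs ih =>
      rw [List.foldl_cons, ih, PySem.Set.mem_add]
      simp only [List.mem_cons]
      constructor
      · rintro (⟨h | h⟩ | ⟨b', hb', h⟩)
        · exact Or.inl h
        · exact Or.inr ⟨b, Or.inl rfl, h.symm⟩
        · exact Or.inr ⟨b', Or.inr hb', h⟩
      · rintro (h | ⟨b', hb' | hb', h⟩)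
        · exact Or.inl (Or.inl h)
        · exact Or.inl (Or.inr (hb' ▸ h.symm))
        · exact Or.inr ⟨b', hb', h⟩

lemma pv_mem_found_fold (l : List Int) (r : Int → List Int) (h : Int → Int → String)
    (s0 : PySem.Set String) (y : String) :
    (y ∈ List.foldl
        (fun fd L => List.foldl (fun fd i => PySem.Set.add fd (h L i)) fd (r L)) s0 l) ↔
      y ∈ s0 ∨ ∃ L ∈ l, ∃ i ∈ r L, h L i = y := by
  induction l generalizing s0 with
  | nil => simp
  | cons L Ls ih =>
      rw [List.foldl_cons, ih, pv_mem_foldl_add]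
      simp only [List.mem_cons]
      constructor
      · rintro (⟨h0 | ⟨i, hi, hy⟩⟩ | ⟨L', hL', hrest⟩)
        · exact Or.inl h0
        · exact Or.inr ⟨L, Or.inl rfl, i, hi, hy⟩
        · exact Or.inr ⟨L', Or.inr hL', hrest⟩
      · rintro (h0 | ⟨L', hL' | hL', hrest⟩)
        · exact Or.inl (Or.inl h0)
        · exact Or.inl (Or.inr (hL' ▸ hrest))
        · exact Or.inr ⟨L', hL', hrest⟩

-- any element of `found` is a contiguous piece of the text; conversely the piece at the
-- matching offset of a length that occurs in `lens` is in `found`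
lemma pv_contains_found (lt : String) (lens : List Int)
    (hnn : ∀ L ∈ lens, 0 ≤ L) (sl : String)
    (hL : ((sl.toList.length : Int)) ∈ lens) :
    PySem.Set.contains (pvFound lt (PySem.Set.ofList lens)) sl = PySem.Str.isIn sl lt := by
  rw [Bool.eq_iff_iff, PySem.Set.contains_iff, PySem.Str.isIn_iff_infix]
  unfold pvFound
  rw [pv_mem_found_fold]
  constructor
  · rintro (h0 | ⟨L, hLmem, i, hi, hslice⟩)
    · simp [PySem.Set.empty] at h0
    · have hLmem' := (PySem.Set.mem_ofList _ _).mp hLmem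
      have h0L : 0 ≤ L := hnn _ hLmem'
      have hi' := PySem.List.mem_pyRange_one.mp hi
      have : sl.toList = List.take ((i + L).toNat - i.toNat) (List.drop i.toNat lt.toList) := by
        rw [← hslice, PySem.Str.toList_slice,
          show some (i + L) = some (((i + L).toNat : Nat) : Int) by rw [Int.toNat_of_nonneg (by omega)],
          show some i = some ((i.toNat : Nat) : Int) by rw [Int.toNat_of_nonneg hi'.1]]
        exact PySem.List.slice_natCast lt.toList i.toNat (i + L).toNat
      rw [this]
      exact ((List.take_prefix _ _).isInfix).trans ((List.drop_suffix _ _).isInfix)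
  · intro hinf
    obtain ⟨pre, post, hsplit⟩ := hinf
    have hlen : lt.toList.length = pre.length + sl.toList.length + post.length := by
      rw [← hsplit]; simp only [List.length_append]
    refine Or.inr ⟨(sl.toList.length : Int), (PySem.Set.mem_ofList _ _).mpr hL,
      (pre.length : Int), ?_, ?_⟩
    · refine PySem.List.mem_pyRange_one.mpr ⟨by positivity, ?_⟩
      rw [PySem.Str.len_eq]
      omega
    · rw [← String.toList_inj, PySem.Str.toList_slice]
      have : ((pre.length : Int)) + (sl.toList.length : Int) = ((pre.length + sl.toList.length : Nat) : Int) := by push_cast; ring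
      rw [this]
      show PySem.List.slice lt.toList (some (pre.length : Int)) (some ((pre.length + sl.toList.length : Nat) : Int)) = sl.toList
      rw [PySem.List.slice_natCast, ← hsplit, Nat.add_sub_cancel_left, List.append_assoc,
        List.drop_left, List.take_left]

lemma pv_lens_nonneg (term_dict : List (String × String)) :
    ∀ L ∈ (term_dict.filter (fun st => !(st.1 == "") && !(st.2 == ""))).map
        (fun st => PySem.Str.len st.1), 0 ≤ L := by
  intro L hLmem
  obtain ⟨st, _, rfl⟩ := List.mem_map.mp hLmem
  rw [PySem.Str.len_eq]
  positivity

lemma pv_len_lower (s : String) : (PySem.Str.lower s).toList.length = s.toList.length := by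
  rw [PySem.Str.toList_lower]; simp [PySem.Chars.lower]

-- ===== VERDICT (by name: the statement is the Claim_ definition above) =====
theorem pick_relevant_terms_spec : Claim_equal_pick_relevant_terms := by
  intro text term_dict _
  unfold Spec_pick_relevant_terms pick_relevant_terms pick_relevant_terms_alt
  by_cases htd : term_dict = []
  · simp [htd]
    rfl
  · rw [if_neg htd]
    refine congrArg PySem.Dict.items ?_
    apply PySem.List.foldl_congr_mem
    intro acc st hst
    by_cases h1 : st.1 = ""
    · simp [h1]
    · by_cases h2 : st.2 = ""
      · simp [h1, h2]
      · have hcond :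
            PySem.Set.contains (pvFound (PySem.Str.lower (if text = "" then "" else text)) (pvLens term_dict))
              (PySem.Str.lower st.1)
            = PySem.Str.isIn (PySem.Str.lower st.1) (PySem.Str.lower (if text = "" then "" else text)) := by
          unfold pvLens
          apply pv_contains_found
          · exact pv_lens_nonneg term_dict
          · rw [pv_len_lower, ← PySem.Str.len_eq]
            exact List.mem_map.mpr ⟨st, List.mem_filter.mpr ⟨hst, by simp [h1, h2]⟩, rfl⟩
        simp only [h1, h2, or_self, if_false]
        rw [hcond]
        simp [h1, h2]
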